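-- pv_equiv track=rewrite | github.com/Chissanu/KMITL | PCA/Week4/pca4.py | m05
-- ===== SOURCE A (Python) =====
-- def m05(n: int):
--     round1s = 0
--     sum = 0
--     while round1s < n:
--         sum += 1
--         round1s += 1
--
--     round2s = 0
--     while round2s < n:
--         sum += 1
--         round2s += 1
--     return sum
--
-- n = 10
-- ===== SOURCE B (Python) =====
-- def m05(n: int):
--     # closed form: each loop adds one per iteration, running only while the counter is below n
--     return 2 * n if n > 0 else 0
-- ===== Notes on version B (the rewrite author's own statement) =====
-- stated objective: faster
-- what changed: Replaced the pair of counting while-loops by a closed-form expression: double n, or zero when n is nonpositive.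
import Mathlib
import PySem

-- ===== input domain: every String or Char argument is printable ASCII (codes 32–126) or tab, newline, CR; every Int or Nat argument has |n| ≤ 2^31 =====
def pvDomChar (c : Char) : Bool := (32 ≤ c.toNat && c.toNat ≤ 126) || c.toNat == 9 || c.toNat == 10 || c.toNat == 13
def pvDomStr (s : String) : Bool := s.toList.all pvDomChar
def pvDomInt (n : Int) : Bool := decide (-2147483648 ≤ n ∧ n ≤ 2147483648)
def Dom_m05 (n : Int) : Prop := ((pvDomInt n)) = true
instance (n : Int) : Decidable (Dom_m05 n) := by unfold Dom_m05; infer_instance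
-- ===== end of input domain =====

-- B replaces A's pair of counting while-loops by a closed form (double n, zero when nonpositive): faster.

-- ===== PORT A =====
-- one counting while-loop of A: while round < n: sum += 1; round += 1
def m05Loop (n round sum : Int) : Int :=
  if round < n then m05Loop n (round + 1) (sum + 1) else sum
termination_by (n - round).toNat
decreasing_by omega

def m05 (n : Int) : Int :=
  let sum1 := m05Loop n 0 0      -- first while loop, starting from sum = 0
  m05Loop n 0 sum1               -- second while loop, continuing the sum

-- ===== PORT B =====
def m05_alt (n : Int) : Int := if n > 0 then 2 * n else 0

-- ===== PRECONDITION & SPEC =====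
def Spec_m05 (n : Int) (out : Int) : Prop := out = m05_alt n
instance (n : Int) (out : Int) : Decidable (Spec_m05 n out) := by unfold Spec_m05; infer_instance

-- ===== CLAIM (what is proved, stated in full; the proofs are below) =====
def Claim_equal_m05 : Prop := ∀ (n : Int), Dom_m05 n → Spec_m05 n (m05 n)

-- ===== LEMMAS AND PROOFS =====
theorem m05Loop_eq (n : Int) : ∀ (round sum : Int), m05Loop n round sum = sum + max (n - round) 0 := by
  intro round sum
  induction h : (n - round).toNat generalizing round sum with
  | zero => rw [m05Loop]; split <;> omega
  | succ k ih =>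
      rw [m05Loop]
      split
      · rw [ih (round + 1) (sum + 1) (by omega)]; omega
      · omega

-- ===== VERDICT (by name: the statement is the Claim_ definition above) =====
theorem m05_spec : Claim_equal_m05 := by
  intro n _
  unfold Spec_m05 m05 m05_alt
  simp only [m05Loop_eq]
  split <;> omega
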